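-- pv_equiv track=rewrite | github.com/linBattery/Group-20-AI-yu-cheng | AI_final/tai_shu.py | big_four_happy
-- ===== SOURCE A (Python) =====
-- def big_four_happy(card_in_hand, exposed_card):
--     """大四喜：東、南、西、北四風刻"""
--     e_cnt, w_cnt, n_cnt, s_cnt = 0, 0, 0, 0
--
--     for card in card_in_hand:
--         if card == "e": e_cnt += 1
--         elif card == "n": n_cnt += 1
--         elif card == "s": s_cnt += 1
--         elif card == "w": w_cnt += 1
--
--     for card in exposed_card:
--         if card == "e": e_cnt += 1
--         elif card == "n": n_cnt += 1
--         elif card == "s": s_cnt += 1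
--         elif card == "w": w_cnt += 1
--
--     return e_cnt == 3 and s_cnt == 3 and w_cnt == 3 and n_cnt == 3
-- ===== SOURCE B (Python) =====
-- def big_four_happy(card_in_hand, exposed_card):
--     """大四喜：東、南、西、北四風刻 — filter out the wind tiles, sort them, compare to the exact target multiset."""
--     winds = [c for c in list(card_in_hand) + list(exposed_card) if c in ("e", "n", "s", "w")]
--     return sorted(winds) == ["e"] * 3 + ["n"] * 3 + ["s"] * 3 + ["w"] * 3
-- ===== Notes on version B (the rewrite author's own statement) =====
-- stated objective: alternative
-- what changed: Instead of tallying four counters in one branch-dispatch pass, B filters the wind tiles out of the merged list, sorts them, and compares the sorted list to the literal target multiset e,e,e,n,n,n,s,s,s,w,w,w.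
import Mathlib
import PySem

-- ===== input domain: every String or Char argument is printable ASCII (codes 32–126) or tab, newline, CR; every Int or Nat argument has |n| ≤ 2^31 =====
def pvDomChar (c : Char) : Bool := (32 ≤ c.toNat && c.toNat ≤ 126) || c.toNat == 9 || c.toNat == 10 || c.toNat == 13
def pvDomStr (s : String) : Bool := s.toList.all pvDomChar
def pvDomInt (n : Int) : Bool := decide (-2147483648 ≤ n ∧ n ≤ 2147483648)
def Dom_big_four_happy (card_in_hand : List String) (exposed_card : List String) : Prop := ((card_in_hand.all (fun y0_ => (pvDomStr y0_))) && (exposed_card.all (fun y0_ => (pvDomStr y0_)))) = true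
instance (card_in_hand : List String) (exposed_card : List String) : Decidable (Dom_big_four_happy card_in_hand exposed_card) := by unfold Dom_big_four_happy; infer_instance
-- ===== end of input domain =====

-- B replaces A's branch-dispatch four-counter tally with filter-the-winds, sort, compare
-- to the literal target multiset (objective: alternative, not faster).

-- ===== PORT A =====
-- one loop-body step of A's tally over (e_cnt, n_cnt, s_cnt, w_cnt)
def pvStep (st : Int × Int × Int × Int) (card : String) : Int × Int × Int × Int :=
  if card == "e" then (st.1 + 1, st.2.1, st.2.2.1, st.2.2.2)
  else if card == "n" then (st.1, st.2.1 + 1, st.2.2.1, st.2.2.2)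
  else if card == "s" then (st.1, st.2.1, st.2.2.1 + 1, st.2.2.2)
  else if card == "w" then (st.1, st.2.1, st.2.2.1, st.2.2.2 + 1)
  else st

def big_four_happy (card_in_hand : List String) (exposed_card : List String) : Bool :=
  let st0 := card_in_hand.foldl pvStep (0, 0, 0, 0)
  let st := exposed_card.foldl pvStep st0
  st.1 == 3 && st.2.2.1 == 3 && st.2.2.2 == 3 && st.2.1 == 3

-- ===== PORT B =====
-- the target multiset ["e"]*3 + ["n"]*3 + ["s"]*3 + ["w"]*3
def pvTarget : List String :=
  ["e", "e", "e", "n", "n", "n", "s", "s", "s", "w", "w", "w"]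

def big_four_happy_alt (card_in_hand : List String) (exposed_card : List String) : Bool :=
  let winds := (card_in_hand ++ exposed_card).filter
    (fun c => c == "e" || c == "n" || c == "s" || c == "w")
  PySem.List.sorted winds (fun x => x) false == pvTarget

-- ===== PRECONDITION & SPEC =====
def Spec_big_four_happy (card_in_hand : List String) (exposed_card : List String) (out : Bool) : Prop := out = big_four_happy_alt card_in_hand exposed_card
instance (card_in_hand : List String) (exposed_card : List String) (out : Bool) : Decidable (Spec_big_four_happy card_in_hand exposed_card out) := by unfold Spec_big_four_happy; infer_instance

-- ===== CLAIM (what is proved, stated in full; the proofs are below) =====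
def Claim_equal_big_four_happy : Prop := ∀ (card_in_hand : List String) (exposed_card : List String), Dom_big_four_happy card_in_hand exposed_card → Spec_big_four_happy card_in_hand exposed_card (big_four_happy card_in_hand exposed_card)

-- ===== LEMMAS AND PROOFS =====

-- A's fold computes the four counts
theorem pvFoldl_tally (l : List String) (e n s w : Int) :
    l.foldl pvStep (e, n, s, w) =
      (e + l.count "e", n + l.count "n", s + l.count "s", w + l.count "w") := by
  induction l generalizing e n s w with
  | nil => simp
  | cons a l ih =>
    simp only [List.foldl_cons, pvStep, List.count_cons]
    by_cases he : a = "e"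
    · subst he; simp [ih]; omega
    · by_cases hn : a = "n"
      · subst hn; simp [ih]; ring_nf
      · by_cases hs : a = "s"
        · subst hs; simp [ih]; ring_nf
        · by_cases hw : a = "w"
          · subst hw; simp [ih]; ring_nf
          · simp [ih, he, hn, hs, hw]

-- sorted(winds) equals the target iff each wind occurs exactly three times in l
theorem pvSorted_filter_eq_target (l : List String) :
    (PySem.List.sorted
        (l.filter (fun c => c == "e" || c == "n" || c == "s" || c == "w"))
        (fun x => x) false = pvTarget) ↔
      (l.count "e" = 3 ∧ l.count "n" = 3 ∧ l.count "s" = 3 ∧ l.count "w" = 3) := by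
  have hpair : pvTarget.Pairwise (· ≤ ·) := by
    simp [pvTarget, List.pairwise_cons, String.le_iff_toList_le]; decide
  have hcount : ∀ x : String,
      (List.count x (l.filter (fun c => c == "e" || c == "n" || c == "s" || c == "w"))
        = List.count x pvTarget) ↔
      (x = "e" ∨ x = "n" ∨ x = "s" ∨ x = "w" → List.count x l = 3) := by
    intro x
    by_cases hxe : x = "e"
    · subst hxe; simp [pvTarget, List.count_filter]
    · by_cases hxn : x = "n"
      · subst hxn; simp [pvTarget, List.count_filter]
      · by_cases hxs : x = "s"
        · subst hxs; simp [pvTarget, List.count_filter]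
        · by_cases hxw : x = "w"
          · subst hxw; simp [pvTarget, List.count_filter]
          · have h1 : List.count x
                (l.filter (fun c => c == "e" || c == "n" || c == "s" || c == "w")) = 0 := by
              refine List.count_eq_zero.mpr (fun hm => ?_)
              have := (List.mem_filter.mp hm).2
              simp [hxe, hxn, hxs, hxw] at this
            have h2 : List.count x pvTarget = 0 := by
              refine List.count_eq_zero.mpr (fun hm => ?_)
              simp [pvTarget] at hm
              rcases hm with h | h | h | h <;> exact absurd h (by assumption)
            simp [h1, h2, hxe, hxn, hxs, hxw]
  constructor
  · intro h
    have hperm : (l.filter (fun c => c == "e" || c == "n" || c == "s" || c == "w")).Perm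
        pvTarget := h ▸ (PySem.List.sorted_perm _ _ _).symm
    have hc := List.perm_iff_count.mp hperm
    exact ⟨(hcount "e").mp (hc "e") (Or.inl rfl),
           (hcount "n").mp (hc "n") (Or.inr (Or.inl rfl)),
           (hcount "s").mp (hc "s") (Or.inr (Or.inr (Or.inl rfl))),
           (hcount "w").mp (hc "w") (Or.inr (Or.inr (Or.inr rfl)))⟩
  · rintro ⟨he, hn, hs, hw⟩
    refine PySem.List.sorted_id_eq_of_perm_of_pairwise _ _ ?_ hpair
    refine List.perm_iff_count.mpr (fun x => ((hcount x).mpr ?_).symm)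
    rintro (rfl | rfl | rfl | rfl) <;> assumption

-- ===== VERDICT (by name: the statement is the Claim_ definition above) =====
theorem big_four_happy_spec : Claim_equal_big_four_happy := by
  intro h x _
  unfold Spec_big_four_happy big_four_happy big_four_happy_alt
  simp only [pvFoldl_tally, zero_add]
  rw [Bool.eq_iff_iff]
  simp only [beq_iff_eq, Bool.and_eq_true, List.filter_append]
  rw [← List.filter_append, pvSorted_filter_eq_target, List.count_append,
    List.count_append, List.count_append, List.count_append]
  constructor
  · rintro ⟨⟨⟨he, hs⟩, hw⟩, hn⟩
    refine ⟨?_, ?_, ?_, ?_⟩ <;> [skip; exact_mod_cast hn; exact_mod_cast hs; exact_mod_cast hw]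
    exact_mod_cast he
  · rintro ⟨he, hn, hs, hw⟩
    exact ⟨⟨⟨by exact_mod_cast he, by exact_mod_cast hs⟩, by exact_mod_cast hw⟩,
      by exact_mod_cast hn⟩
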